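-- pv_equiv track=rewrite | github.com/gesture02/Algorithm | 백준/20327.py | r6
-- ===== SOURCE A (Python) =====
-- def r6(p, l):
--     n = len(p)
--     a = [[0] * n for _ in range(n)]
--     subSize = (1 << l)
--     subCount = n // subSize
--     for i in range(subCount):
--         for j in range(subCount):
--             sx1 = i * subSize
--             sy1 = j * subSize
--             sx2 = i * subSize
--             sy2 = (subCount-1-j) * subSize
--             for x in range(subSize):
--                 for y in range(subSize):
--                     a[sx1+x][sy1+y] = p[sx2+x][sy2+y]
--     return a
-- ===== SOURCE B (Python) =====
-- def r6(p, l):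
--     n = len(p)
--     s = 1 << l
--     k = n // s
--     m = k * s
--     out = []
--     for r in range(n):
--         if r < m:
--             row = []
--             for b in range(k - 1, -1, -1):
--                 row += p[r][b * s:(b + 1) * s]
--             row += [0] * (n - m)
--             out.append(row)
--         else:
--             out.append([0] * n)
--     return out
-- ===== Notes on version B (the rewrite author's own statement) =====
-- stated objective: simpler
-- what changed: A fills an output matrix cell-by-cell with four nested index loops over row-blocks, column-blocks and intra-block offsets; B makes one pass over the rows and builds each row by concatenating its width-subSize column slices in reverse block order, appending zeros for the leftover columns and rows.
import Mathlib
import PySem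

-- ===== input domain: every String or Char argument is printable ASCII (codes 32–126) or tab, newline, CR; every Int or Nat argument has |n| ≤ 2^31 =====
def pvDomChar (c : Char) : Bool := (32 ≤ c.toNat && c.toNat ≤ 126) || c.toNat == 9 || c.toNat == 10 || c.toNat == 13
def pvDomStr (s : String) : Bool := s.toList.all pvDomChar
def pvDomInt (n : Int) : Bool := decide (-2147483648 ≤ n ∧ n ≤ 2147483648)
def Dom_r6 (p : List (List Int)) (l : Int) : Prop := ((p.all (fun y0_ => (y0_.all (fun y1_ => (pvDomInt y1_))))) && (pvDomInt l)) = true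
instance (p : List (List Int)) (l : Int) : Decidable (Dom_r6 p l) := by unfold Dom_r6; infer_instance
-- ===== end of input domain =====

-- B replaces A's four nested index loops by a single row-wise pass that concatenates
-- each row's width-subSize column chunks in reverse order (objective: simpler).

-- ===== PORT A =====
-- Python 'a[i][j] = v' with in-range indices (A's indices are always in range)
def pySet2 (a : List (List Int)) (i j : Nat) (v : Int) : List (List Int) :=
  a.set i ((a.getD i []).set j v)

def r6 (p : List (List Int)) (l : Int) : List (List Int) :=
  let n := p.length
  let a0 := List.replicate n (List.replicate n (0 : Int))
  let s := 1 <<< l.toNat          -- 1 << l ; l ≥ 0 inside Pre_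
  let k := n / s
  (List.range k).foldl (fun a i =>
    (List.range k).foldl (fun a j =>
      (List.range s).foldl (fun a x =>
        (List.range s).foldl (fun a y =>
          -- p[sx2+x][sy2+y]; these reads are in range inside Pre_, ported with getD
          pySet2 a (i*s + x) (j*s + y) ((p.getD (i*s + x) []).getD ((k-1-j)*s + y) 0)
        ) a) a) a) a0

-- ===== PORT B =====
def r6_alt (p : List (List Int)) (l : Int) : List (List Int) :=
  let n := p.length
  let s := 1 <<< l.toNat
  let k := n / s
  let m := k * s
  (List.range n).map (fun r =>                             -- for r in range(n): out.append(...)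
    if r < m then
      ((List.range k).reverse.foldl (fun row b =>          -- for b in range(k-1,-1,-1): row += p[r][b*s:(b+1)*s]
        row ++ PySem.List.slice (p.getD r []) (some ((b*s : Nat) : Int)) (some (((b+1)*s : Nat) : Int))) [])
      ++ List.replicate (n - m) 0                          -- row += [0]*(n-m)
    else List.replicate n 0)                               -- out.append([0]*n)

-- ===== PRECONDITION & SPEC =====
-- Pre_ excludes exactly the inputs on which A raises: negative l (1 << l is a
-- ValueError) and matrices whose first (n//2^l)*2^l rows are shorter than
-- (n//2^l)*2^l (A's read p[sx2+x][sy2+y] is an IndexError there).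
def Pre_r6 (p : List (List Int)) (l : Int) : Prop :=
  0 ≤ l ∧ ∀ row ∈ p.take ((p.length / (1 <<< l.toNat)) * (1 <<< l.toNat)),
    (p.length / (1 <<< l.toNat)) * (1 <<< l.toNat) ≤ row.length
instance (p : List (List Int)) (l : Int) : Decidable (Pre_r6 p l) := by unfold Pre_r6; infer_instance

def pvWitness_r6 : List (List Int) × Int := ([[1,2,3,4],[5,6,7,8],[9,10,11,12],[13,14,15,16]], 1)

def Spec_r6 (p : List (List Int)) (l : Int) (out : List (List Int)) : Prop := out = r6_alt p l
instance (p : List (List Int)) (l : Int) (out : List (List Int)) : Decidable (Spec_r6 p l out) := by unfold Spec_r6; infer_instance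

-- ===== CLAIM (what is proved, stated in full; the proofs are below) =====
def Claim_equal_r6 : Prop := ∀ (p : List (List Int)) (l : Int), Dom_r6 p l → Pre_r6 p l → Spec_r6 p l (r6 p l)

-- ===== LEMMAS AND PROOFS =====

-- a cell of the grid, total form
def pvCell (a : List (List Int)) (r c : Nat) : Int := (a.getD r []).getD c 0

-- one write step over a (row, col, value) triple
def pvStep (a : List (List Int)) (w : Nat × Nat × Int) : List (List Int) :=
  pySet2 a w.1 w.2.1 w.2.2

theorem length_pySet2 (a : List (List Int)) (i j : Nat) (v : Int) :
    (pySet2 a i j v).length = a.length := by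
  simp [pySet2]

theorem getD_set' {α : Type} (a : List α) (i r : Nat) (w d : α) :
    (a.set i w).getD r d = if i = r ∧ i < a.length then w else a.getD r d := by
  simp only [List.getD, List.getElem?_set]
  split_ifs with h1 h2 h3 h3 <;> simp_all <;> omega

theorem rowlen_pySet2 (a : List (List Int)) (i j : Nat) (v : Int) (r : Nat) :
    ((pySet2 a i j v).getD r []).length = (a.getD r []).length := by
  simp only [pySet2, getD_set']
  split_ifs with h
  · simp [h.1]
  · rfl

theorem pvCell_pySet2_ne (a : List (List Int)) (i j : Nat) (v : Int) (r c : Nat)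
    (h : i ≠ r ∨ j ≠ c) : pvCell (pySet2 a i j v) r c = pvCell a r c := by
  simp only [pvCell, pySet2, getD_set']
  split_ifs with h1
  · rcases h with h | h
    · exact absurd h1.1 h
    · rw [h1.1, getD_set']
      split_ifs with h2
      · exact absurd h2.1 h
      · rfl
  · rfl

theorem pvCell_pySet2_eq (a : List (List Int)) (i j : Nat) (v : Int)
    (hi : i < a.length) (hj : j < (a.getD i []).length) :
    pvCell (pySet2 a i j v) i j = v := by
  have hgeti : a.getD i [] = a[i] := List.getD_eq_getElem _ _ hi
  have hj' : j < a[i].length := hgeti ▸ hj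
  simp [pvCell, pySet2, getD_set', hi, hgeti, List.getD, hj']

theorem length_foldl_pvStep (ws : List (Nat × Nat × Int)) (a : List (List Int)) :
    (ws.foldl pvStep a).length = a.length := by
  induction ws generalizing a with
  | nil => rfl
  | cons w t ih => simp only [List.foldl_cons, ih, pvStep, length_pySet2]

theorem rowlen_foldl_pvStep (ws : List (Nat × Nat × Int)) (a : List (List Int)) (r : Nat) :
    ((ws.foldl pvStep a).getD r []).length = (a.getD r []).length := by
  induction ws generalizing a with
  | nil => rfl
  | cons w t ih => simp only [List.foldl_cons, ih, pvStep, rowlen_pySet2]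

theorem pvCell_foldl_nowrite (ws : List (Nat × Nat × Int)) (a : List (List Int)) (r c : Nat)
    (h : ∀ w ∈ ws, w.1 ≠ r ∨ w.2.1 ≠ c) :
    pvCell (ws.foldl pvStep a) r c = pvCell a r c := by
  induction ws generalizing a with
  | nil => rfl
  | cons w t ih =>
      simp only [List.foldl_cons]
      rw [ih _ (fun w hw => h w (List.mem_cons_of_mem _ hw))]
      exact pvCell_pySet2_ne _ _ _ _ _ _ (h w (List.mem_cons_self))

theorem pvCell_foldl_write (u t : List (Nat × Nat × Int)) (r c : Nat) (v : Int)
    (a : List (List Int))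
    (hr : r < a.length) (hc : c < (a.getD r []).length)
    (ht : ∀ w ∈ t, w.1 ≠ r ∨ w.2.1 ≠ c) :
    pvCell ((u ++ (r, c, v) :: t).foldl pvStep a) r c = v := by
  rw [List.foldl_append, List.foldl_cons, pvCell_foldl_nowrite t _ r c ht]
  have h1 : r < (u.foldl pvStep a).length := by rw [length_foldl_pvStep]; exact hr
  have h2 : c < ((u.foldl pvStep a).getD r []).length := by rw [rowlen_foldl_pvStep]; exact hc
  exact pvCell_pySet2_eq _ _ _ _ h1 h2

-- the complete write list of A's four nested loops
def pvW (p : List (List Int)) (s k : Nat) : List (Nat × Nat × Int) :=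
  (List.range k).flatMap (fun i =>
    (List.range k).flatMap (fun j =>
      (List.range s).flatMap (fun x =>
        (List.range s).map (fun y =>
          (i*s + x, j*s + y, (p.getD (i*s + x) []).getD ((k-1-j)*s + y) 0)))))

theorem r6_eq_foldl_pvW (p : List (List Int)) (l : Int) :
    r6 p l = (pvW p (1 <<< l.toNat) (p.length / (1 <<< l.toNat))).foldl pvStep
      (List.replicate p.length (List.replicate p.length (0 : Int))) := by
  simp only [r6, pvW, List.foldl_flatMap, List.foldl_map, pvStep]

theorem pvW_target_lt (p : List (List Int)) (s k : Nat) (w : Nat × Nat × Int)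
    (hw : w ∈ pvW p s k) : w.1 < k * s ∧ w.2.1 < k * s := by
  simp only [pvW, List.mem_flatMap, List.mem_map, List.mem_range] at hw
  obtain ⟨i, hi, j, hj, x, hx, y, hy, rfl⟩ := hw
  have h1 : (i+1)*s ≤ k*s := Nat.mul_le_mul_right s hi
  have h2 : (j+1)*s ≤ k*s := Nat.mul_le_mul_right s hj
  constructor <;> simp only [] <;> nlinarith

theorem pvW_targets_nodup (p : List (List Int)) (s k : Nat) :
    ((pvW p s k).map (fun w => (w.1, w.2.1))).Nodup := by
  simp only [pvW, List.map_flatMap, List.map_map, Function.comp_def]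
  rw [List.nodup_flatMap]
  refine ⟨fun i _ => ?_, List.Pairwise.imp ?_ List.pairwise_lt_range⟩
  · rw [List.nodup_flatMap]
    refine ⟨fun j _ => ?_, List.Pairwise.imp ?_ List.pairwise_lt_range⟩
    · rw [List.nodup_flatMap]
      refine ⟨fun x _ => ?_, List.Pairwise.imp ?_ List.pairwise_lt_range⟩
      · refine List.Nodup.map ?_ List.nodup_range
        intro y y' h
        have h2 : j*s + y = j*s + y' := congrArg Prod.snd h
        omega
      · intro x x' hxx z hz hz'
        simp only [List.mem_map, List.mem_range] at hz hz'
        obtain ⟨y, hy, rfl⟩ := hz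
        obtain ⟨y', hy', h⟩ := hz'
        simp only [Prod.mk.injEq] at h
        omega
    · intro j j' hjj z hz hz'
      simp only [List.mem_flatMap, List.mem_map, List.mem_range] at hz hz'
      obtain ⟨x, hx, y, hy, rfl⟩ := hz
      obtain ⟨x', hx', y', hy', h⟩ := hz'
      simp only [Prod.mk.injEq] at h
      have hmul : (j+1)*s ≤ j'*s := Nat.mul_le_mul_right s (by omega)
      have h2 := h.2
      nlinarith
  · intro i i' hii z hz hz'
    simp only [List.mem_flatMap, List.mem_map, List.mem_range] at hz hz'
    obtain ⟨j, hj, x, hx, y, hy, rfl⟩ := hz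
    obtain ⟨j', hj', x', hx', y', hy', h⟩ := hz'
    simp only [Prod.mk.injEq] at h
    have hmul : (i+1)*s ≤ i'*s := Nat.mul_le_mul_right s (by omega)
    have h1 := h.1
    nlinarith

theorem pv_mem_pvW (p : List (List Int)) (s k : Nat) (hs : 0 < s) (r c : Nat)
    (hr : r < k * s) (hc : c < k * s) :
    (r, c, (p.getD r []).getD ((k - 1 - c / s) * s + c % s) 0) ∈ pvW p s k := by
  simp only [pvW, List.mem_flatMap, List.mem_map, List.mem_range]
  refine ⟨r / s, ?_, c / s, ?_, r % s, Nat.mod_lt _ hs, c % s, Nat.mod_lt _ hs, ?_⟩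
  · exact Nat.div_lt_of_lt_mul (by rwa [Nat.mul_comm] at hr)
  · exact Nat.div_lt_of_lt_mul (by rwa [Nat.mul_comm] at hc)
  · rw [Nat.div_add_mod' r s, Nat.div_add_mod' c s]

-- the unique value A leaves at an in-block cell
theorem pvCell_r6_in (p : List (List Int)) (l : Int) (r c : Nat)
    (hr : r < (p.length / (1 <<< l.toNat)) * (1 <<< l.toNat))
    (hc : c < (p.length / (1 <<< l.toNat)) * (1 <<< l.toNat)) :
    pvCell (r6 p l) r c =
      (p.getD r []).getD
        ((p.length / (1 <<< l.toNat) - 1 - c / (1 <<< l.toNat)) * (1 <<< l.toNat)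
          + c % (1 <<< l.toNat)) 0 := by
  rw [r6_eq_foldl_pvW]
  set s := 1 <<< l.toNat with hsdef
  set k := p.length / s with hkdef
  have hs : 0 < s := Nat.pos_of_ne_zero (by simp [hsdef, Nat.shiftLeft_eq])
  have hmn : k * s ≤ p.length := Nat.div_mul_le_self _ _
  have hrn : r < p.length := lt_of_lt_of_le hr hmn
  have hcn : c < p.length := lt_of_lt_of_le hc hmn
  obtain ⟨u, t, hsplit⟩ := List.append_of_mem (pv_mem_pvW p s k hs r c hr hc)
  have hnodup := pvW_targets_nodup p s k
  rw [hsplit] at hnodup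
  simp only [List.map_append, List.map_cons, List.nodup_append, List.nodup_cons] at hnodup
  have ht : ∀ w ∈ t, w.1 ≠ r ∨ w.2.1 ≠ c := by
    intro w hw
    by_contra hcon
    push Not at hcon
    exact hnodup.2.1.1
      (by simpa [hcon.1, hcon.2] using List.mem_map_of_mem (f := fun w => (w.1, w.2.1)) hw)
  rw [hsplit]
  exact pvCell_foldl_write u t r c _ _
    (by simpa using hrn)
    (by rw [List.getD_replicate _ hrn]; simpa using hcn) ht

theorem pvCell_r6_out (p : List (List Int)) (l : Int) (r c : Nat)
    (h : (p.length / (1 <<< l.toNat)) * (1 <<< l.toNat) ≤ r ∨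
         (p.length / (1 <<< l.toNat)) * (1 <<< l.toNat) ≤ c) :
    pvCell (r6 p l) r c = 0 := by
  rw [r6_eq_foldl_pvW, pvCell_foldl_nowrite]
  · simp only [pvCell, List.getD, List.getElem?_replicate]
    split
    · simp only [Option.getD_some, List.getElem?_replicate]
      split <;> simp
    · simp
  · intro w hw
    have h1 := pvW_target_lt p _ _ w hw
    rcases h with h | h
    · exact Or.inl (fun e => absurd h1.1 (by rw [e]; exact not_lt.mpr h))
    · exact Or.inr (fun e => absurd h1.2 (by rw [e]; exact not_lt.mpr h))

-- B side: the reversed-chunk fold is a flatMap of chunks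
theorem pv_flat_eq (L : List Int) (s k : Nat) :
    ((List.range k).reverse.foldl (fun row b =>
        row ++ PySem.List.slice L (some ((b*s : Nat) : Int)) (some (((b+1)*s : Nat) : Int))) [])
      = (List.range k).reverse.flatMap (fun b => (L.drop (b*s)).take s) := by
  rw [PySem.List.foldl_append_eq_flatMap]
  simp only [List.nil_append]
  congr 1
  funext b
  rw [PySem.List.slice_natCast]
  have hsub : (b+1)*s - b*s = s := by rw [Nat.succ_mul]; omega
  rw [hsub]

theorem pv_flat_spec (f : Nat → List Int) (s k : Nat) (hs : 0 < s)
    (hlen : ∀ b < k, (f b).length = s) :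
    ((List.range k).reverse.flatMap f).length = k * s ∧
    ∀ c < k * s, ((List.range k).reverse.flatMap f).getD c 0 = (f (k - 1 - c / s)).getD (c % s) 0 := by
  induction k with
  | zero => simp
  | succ k ih =>
      obtain ⟨ihl, ihe⟩ := ih (fun b hb => hlen b (by omega))
      have hfk : (f k).length = s := hlen k (by omega)
      have hrw : (List.range (k+1)).reverse = k :: (List.range k).reverse := by
        rw [List.range_succ, List.reverse_append]; rfl
      rw [hrw]
      simp only [List.flatMap_cons]
      have hL : ((f k) ++ (List.range k).reverse.flatMap f).length = (k+1)*s := by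
        rw [List.length_append, hfk, ihl]; ring
      refine ⟨hL, ?_⟩
      intro c hc
      have hc' : c < k*s + s := by rw [Nat.succ_mul] at hc; exact hc
      rcases Nat.lt_or_ge c s with h | h
      · rw [List.getD_append _ _ _ _ (by rw [hfk]; exact h),
          Nat.div_eq_of_lt h, Nat.mod_eq_of_lt h]
        have he : k + 1 - 1 - 0 = k := by omega
        rw [he]
      · have hck : c - s < k * s := by omega
        rw [List.getD_append_right _ _ _ _ (by rw [hfk]; exact h), hfk]
        have hget := ihe (c - s) hck
        set q := c / s with hQ
        set u := c % s with hU
        have hq0 : q * s + u = c := Nat.div_add_mod' c s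
        have hdiv : 1 ≤ q := (Nat.one_le_div_iff hs).mpr h
        have hu : u < s := Nat.mod_lt _ hs
        have e0 : q * s = s + (q - 1) * s := by
          have hh : q = (q - 1) + 1 := by omega
          calc q * s = ((q - 1) + 1) * s := by rw [← hh]
            _ = (q - 1) * s + s := Nat.succ_mul _ _
            _ = s + (q - 1) * s := by omega
        have e1 : c - s = u + (q - 1) * s := by omega
        have hd : (c - s) / s = q - 1 := by
          rw [e1, Nat.add_mul_div_right _ _ hs, Nat.div_eq_of_lt hu]
          exact Nat.zero_add _
        have hm : (c - s) % s = u := by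
          rw [e1, Nat.add_mul_mod_self_right, Nat.mod_eq_of_lt hu]
        rw [hget, hd, hm]
        have he : k - 1 - (q - 1) = k + 1 - 1 - q := by omega
        rw [he]

-- a chunk entry is a row entry
theorem pv_chunk_getD (L : List Int) (a i s : Nat) (hi : i < s) (hbound : a + s ≤ L.length) :
    ((L.drop a).take s).getD i 0 = L.getD (a + i) 0 := by
  rw [List.getD_eq_getElem _ _ (hn := by simp; omega),
      List.getD_eq_getElem _ _ (hn := by omega)]
  simp

-- ===== VERDICT (by name: the statement is the Claim_ definition above) =====
theorem r6_spec : Claim_equal_r6 := by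
  intro p l _ hpre
  unfold Spec_r6
  obtain ⟨-, hrows⟩ := hpre
  simp only [r6_alt]
  set s := 1 <<< l.toNat with hsdef
  set k := p.length / s with hkdef
  set m := k * s with hmdef
  set n := p.length with hndef
  have hs : 0 < s := Nat.pos_of_ne_zero (by simp [hsdef, Nat.shiftLeft_eq])
  have hmn : m ≤ n := Nat.div_mul_le_self _ _
  have hfolds : (1 <<< l.toNat) = s := hsdef.symm
  have hfoldk : p.length / (1 <<< l.toNat) = k := by rw [hfolds, ← hndef, ← hkdef]
  have hfold : (p.length / (1 <<< l.toNat)) * (1 <<< l.toNat) = m := by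
    rw [hfoldk, hfolds, ← hmdef]
  have hrowlen : ∀ r, r < m → m ≤ (p.getD r []).length := by
    intro r hr
    have hrn : r < n := lt_of_lt_of_le hr hmn
    refine hrows _ ?_
    rw [List.getD_eq_getElem _ _ (hn := hrn)]
    have hmem : (p.take m)[r]'(by simp [hndef]; omega) ∈ p.take m := List.getElem_mem _
    rwa [List.getElem_take] at hmem
  have hlenA : (r6 p l).length = n := by
    rw [r6_eq_foldl_pvW, length_foldl_pvStep]; simp [hndef]
  have hrowlenA : ∀ r, ((r6 p l).getD r []).length = if r < n then n else 0 := by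
    intro r
    rw [r6_eq_foldl_pvW, rowlen_foldl_pvStep]
    rcases Nat.lt_or_ge r n with h | h
    · rw [List.getD_replicate _ (by simpa [hndef] using h)]; simp [h]; exact hndef.symm
    · rw [List.getD_eq_default _ _ (by simpa [hndef] using h)]; simp [Nat.not_lt.mpr h]
  apply List.ext_getElem
  · simpa using hlenA
  · intro r h1 h2
    rw [List.getElem_map, List.getElem_range]
    have hrn : r < n := by simpa using h2
    have hrowA : (r6 p l)[r] = (r6 p l).getD r [] :=
      (List.getD_eq_getElem _ _ (hn := h1)).symm
    by_cases hrm : r < m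
    · rw [if_pos hrm, hrowA]
      have hL := hrowlen r hrm
      have hchunklen : ∀ b, b < k → (((p.getD r []).drop (b*s)).take s).length = s := by
        intro b hb
        have hbs : (b+1)*s ≤ m := by rw [hmdef]; exact Nat.mul_le_mul_right s hb
        simp only [List.length_take, List.length_drop]
        rw [Nat.succ_mul] at hbs
        omega
      obtain ⟨hflen, hfget⟩ := pv_flat_spec _ s k hs hchunklen
      rw [pv_flat_eq]
      apply List.ext_getElem
      · rw [hrowlenA, if_pos hrn]
        simp only [List.length_append, List.length_replicate, hflen, ← hmdef]
        omega
      · intro c hc1 hc2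
        have hcn : c < n := by
          have h' := hc1; rw [hrowlenA, if_pos hrn] at h'; exact h'
        rw [← List.getD_eq_getElem _ 0, ← List.getD_eq_getElem _ 0]
        rcases Nat.lt_or_ge c m with hcm | hcm
        · have hA := pvCell_r6_in p l r c (by rw [hfold]; exact hrm) (by rw [hfold]; exact hcm)
          rw [hfoldk, hfolds] at hA
          rw [show ((r6 p l).getD r []).getD c 0 = pvCell (r6 p l) r c from rfl, hA]
          rw [List.getD_append _ _ _ _ (by rw [hflen, ← hmdef]; exact hcm), hfget c (by rwa [← hmdef])]
          have hq : c / s < k := Nat.div_lt_of_lt_mul (by rw [Nat.mul_comm, ← hmdef]; exact hcm)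
          have hk1 : 0 < k := lt_of_le_of_lt (Nat.zero_le _) hq
          have hb2 : (k - 1 - c/s)*s + s ≤ m := by
            have h3 : (k - 1 - c/s) + 1 ≤ k :=
              Nat.succ_le_of_lt (lt_of_le_of_lt (Nat.sub_le _ _) (Nat.sub_lt hk1 one_pos))
            have h2 := Nat.mul_le_mul_right s h3
            rw [Nat.succ_mul] at h2
            rw [hmdef]; exact h2
          rw [pv_chunk_getD _ _ _ _ (Nat.mod_lt _ hs) (le_trans hb2 hL)]
        · rw [show ((r6 p l).getD r []).getD c 0 = pvCell (r6 p l) r c from rfl,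
            pvCell_r6_out p l r c (Or.inr (by rw [hfold]; exact hcm))]
          rw [List.getD_append_right _ _ _ _ (by rw [hflen, ← hmdef]; exact hcm)]
          rw [hflen, ← hmdef, List.getD_replicate _ (by omega)]
    · rw [if_neg hrm, hrowA]
      apply List.ext_getElem
      · rw [hrowlenA, if_pos hrn]; simp
      · intro c hc1 hc2
        have hcn : c < n := by simpa using hc2
        rw [← List.getD_eq_getElem _ 0, ← List.getD_eq_getElem _ 0]
        rw [show ((r6 p l).getD r []).getD c 0 = pvCell (r6 p l) r c from rfl,
          pvCell_r6_out p l r c (Or.inl (by rw [hfold]; omega))]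
        rw [List.getD_replicate _ hcn]
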